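-- pv_equiv track=rewrite | github.com/aronoh00/ProPra | m_pytest_parametrize/pytests/test_pytest_parametrize.py | smallest_letter_and_digit
-- ===== SOURCE A (Python) =====
-- import string
--
-- def smallest_letter_and_digit(input: str) -> tuple[str | None, int | None]:
--     smallest_letter = None
--     smallest_digit = None
--     for char in input:
--         if char in string.ascii_lowercase:
--             if smallest_letter is None or char < smallest_letter:
--                 smallest_letter = char
--         elif char in string.digits:
--             if smallest_digit is None or int(char) < smallest_digit:
--                 smallest_digit = int(char)
--     return smallest_letter, smallest_digit
-- ===== SOURCE B (Python) =====
-- import string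
--
-- def smallest_letter_and_digit(input: str) -> tuple[str | None, int | None]:
--     smallest_letter = min((c for c in input if c in string.ascii_lowercase), default=None)
--     smallest_digit = min((int(c) for c in input if c in string.digits), default=None)
--     return smallest_letter, smallest_digit
-- ===== Notes on version B (the rewrite author's own statement) =====
-- stated objective: idiomatic
-- what changed: Replaces the single interleaved running-min loop with two independent category reductions: min with default=None over a filtered letter generator and over a filtered int-digit generator.
import Mathlib
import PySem

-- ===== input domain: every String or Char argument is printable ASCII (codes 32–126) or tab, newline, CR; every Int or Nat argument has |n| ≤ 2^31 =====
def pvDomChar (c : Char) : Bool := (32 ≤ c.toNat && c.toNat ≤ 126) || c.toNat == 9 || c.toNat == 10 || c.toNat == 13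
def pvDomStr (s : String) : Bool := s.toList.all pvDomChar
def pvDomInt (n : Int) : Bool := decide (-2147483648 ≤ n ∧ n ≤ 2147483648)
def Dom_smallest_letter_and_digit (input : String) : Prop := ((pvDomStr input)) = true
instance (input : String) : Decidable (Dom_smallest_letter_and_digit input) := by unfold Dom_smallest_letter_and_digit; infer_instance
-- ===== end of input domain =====

-- B replaces A's single interleaved running-min loop by two independent min-with-default
-- reductions over filtered generators (idiomatic; return value identical).

-- ===== PORT A =====
-- 'char in string.ascii_lowercase' / 'char in string.digits' are the range tests below;
-- the running smallest letter is a one-character string in Python, held here as a Char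
-- (single-character string comparison is exactly Char comparison) and wrapped at return.
def pvIsLowerA (c : Char) : Bool := 'a' ≤ c && c ≤ 'z'
def pvIsDigitA (c : Char) : Bool := '0' ≤ c && c ≤ '9'
def pvIntOf (c : Char) : Int := (c.toNat : Int) - 48   -- int(char) for a digit char

def pvStepA (st : Option Char × Option Int) (c : Char) : Option Char × Option Int :=
  if pvIsLowerA c then
    (match st.1 with
     | none => (some c, st.2)
     | some x => if c < x then (some c, st.2) else st)
  else if pvIsDigitA c then
    (match st.2 with
     | none => (st.1, some (pvIntOf c))
     | some d => if pvIntOf c < d then (st.1, some (pvIntOf c)) else st)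
  else st

def smallest_letter_and_digit (input : String) : Option String × Option Int :=
  let r := input.toList.foldl pvStepA (none, none)
  (r.1.map (fun c => String.ofList [c]), r.2)

-- ===== PORT B =====
def smallest_letter_and_digit_alt (input : String) : Option String × Option Int :=
  let smallest_letter := PySem.List.min? (input.toList.filter pvIsLowerA) (fun c => c)
  let smallest_digit := PySem.List.min? ((input.toList.filter pvIsDigitA).map pvIntOf) (fun d => d)
  (smallest_letter.map (fun c => String.ofList [c]), smallest_digit)

-- ===== PRECONDITION & SPEC =====
def Spec_smallest_letter_and_digit (input : String) (out : Option String × Option Int) : Prop := out = smallest_letter_and_digit_alt input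
instance (input : String) (out : Option String × Option Int) : Decidable (Spec_smallest_letter_and_digit input out) := by unfold Spec_smallest_letter_and_digit; infer_instance

-- ===== CLAIM (what is proved, stated in full; the proofs are below) =====
def Claim_equal_smallest_letter_and_digit : Prop := ∀ (input : String), Dom_smallest_letter_and_digit input → Spec_smallest_letter_and_digit input (smallest_letter_and_digit input)

-- ===== LEMMAS AND PROOFS =====

-- the two components of A's fold, as separate one-category running mins
def pvFoldL (sl : Option Char) (l : List Char) : Option Char :=
  l.foldl (fun a c => match a with
    | none => some c
    | some x => if c < x then some c else some x) sl

def pvFoldD (sd : Option Int) (l : List Int) : Option Int :=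
  l.foldl (fun a d => match a with
    | none => some d
    | some x => if d < x then some d else some x) sd

-- A's interleaved fold splits into the two filtered folds
theorem pvSplit (l : List Char) : ∀ sl sd,
    l.foldl pvStepA (sl, sd)
      = (pvFoldL sl (l.filter pvIsLowerA), pvFoldD sd ((l.filter pvIsDigitA).map pvIntOf)) := by
  induction l with
  | nil => intro sl sd; rfl
  | cons c t ih =>
    intro sl sd
    by_cases hl : pvIsLowerA c
    · have hd : pvIsDigitA c = false := by
        simp [pvIsLowerA, Char.le_def, UInt32.le_iff_toNat_le] at hl
        simp [pvIsDigitA, Char.le_def, UInt32.le_iff_toNat_le]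
        omega
      cases sl with
      | none => simp [List.foldl, pvStepA, hl, hd, ih, pvFoldL]
      | some x =>
        by_cases hx : c < x <;>
          simp [List.foldl, pvStepA, hl, hd, hx, ih, pvFoldL]
    · by_cases hd : pvIsDigitA c
      · cases sd with
        | none => simp [List.foldl, pvStepA, hl, hd, ih, pvFoldD]
        | some d =>
          by_cases hx : pvIntOf c < d <;>
            simp [List.foldl, pvStepA, hl, hd, hx, ih, pvFoldD]
      · simp [List.foldl, pvStepA, hl, hd, ih]

theorem pvFoldL_some (t : List Char) : ∀ a,
    pvFoldL (some a) t = some (t.foldl min a) := by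
  induction t with
  | nil => intro a; rfl
  | cons c t ih =>
    intro a
    by_cases h : c < a
    · rw [show pvFoldL (some a) (c :: t) = pvFoldL (some c) t from by
        simp [pvFoldL, List.foldl, h], ih]
      simp [List.foldl, min_eq_right (le_of_lt h)]
    · rw [show pvFoldL (some a) (c :: t) = pvFoldL (some a) t from by
        simp [pvFoldL, List.foldl, h], ih]
      simp [List.foldl, min_eq_left (not_lt.1 h)]

theorem pvFoldD_some (t : List Int) : ∀ a,
    pvFoldD (some a) t = some (t.foldl min a) := by
  induction t with
  | nil => intro a; rfl
  | cons c t ih =>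
    intro a
    by_cases h : c < a
    · rw [show pvFoldD (some a) (c :: t) = pvFoldD (some c) t from by
        simp [pvFoldD, List.foldl, h], ih]
      simp [List.foldl, min_eq_right (le_of_lt h)]
    · rw [show pvFoldD (some a) (c :: t) = pvFoldD (some a) t from by
        simp [pvFoldD, List.foldl, h], ih]
      simp [List.foldl, min_eq_left (not_lt.1 h)]

theorem pvFoldL_min? (l : List Char) :
    pvFoldL none l = PySem.List.min? l (fun c => c) := by
  cases l with
  | nil => rfl
  | cons x t =>
    rw [PySem.List.min?_id_cons]
    simpa [pvFoldL, List.foldl] using pvFoldL_some t x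

theorem pvFoldD_min? (l : List Int) :
    pvFoldD none l = PySem.List.min? l (fun d => d) := by
  cases l with
  | nil => rfl
  | cons x t =>
    rw [PySem.List.min?_id_cons]
    simpa [pvFoldD, List.foldl] using pvFoldD_some t x

-- ===== VERDICT (by name: the statement is the Claim_ definition above) =====
theorem smallest_letter_and_digit_spec : Claim_equal_smallest_letter_and_digit := by
  intro input _
  unfold Spec_smallest_letter_and_digit smallest_letter_and_digit smallest_letter_and_digit_alt
  rw [pvSplit, pvFoldL_min?, pvFoldD_min?]
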